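-- pv_equiv track=rewrite | github.com/uygarpolat/advent-of-code | advent-of-code-2025/day04/day04.py | solve
-- ===== SOURCE A (Python) =====
-- from collections import deque
--
-- def get_neighbors(r, c, rows, cols):
--     for x in [-1, 0, 1]:
--         for y in [-1, 0, 1]:
--             if x == 0 and y == 0:
--                 continue
--             nx, ny = r + x, c + y
--             if 0 <= nx < rows and 0 <= ny < cols:
--                 yield (nx, ny)
--
-- def solve(grid_lines):
--
--     rows = len(grid_lines)
--     cols = len(grid_lines[0])
--
--     paper_rolls = set()
--     for r in range(rows):
--         for c in range(cols):
--             if grid_lines[r][c] == "@":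
--                 paper_rolls.add((r, c))
--
--     neighbors = {}
--     queue = deque()
--     discardable = set()
--
--     for r, c in paper_rolls:
--         count = 0
--         for nr, nc in get_neighbors(r, c, rows, cols):
--             if grid_lines[nr][nc] == "@":
--                 count += 1
--         neighbors[(r, c)] = count
--
--         if count < 4:
--             queue.append((r, c))
--             discardable.add((r, c))
--
--     result1 = len(queue)
--     result2 = 0
--
--     while queue:
--         r, c = queue.popleft()
--         result2 += 1
--
--         for nr, nc in get_neighbors(r, c, rows, cols):
--             if (nr, nc) in paper_rolls and (nr, nc) not in discardable:
--                 neighbors[(nr, nc)] -= 1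
--
--                 if neighbors[(nr, nc)] < 4:
--                     queue.append((nr, nc))
--                     discardable.add((nr, nc))
--
--     return result1, result2
-- ===== SOURCE B (Python) =====
-- def solve(grid_lines):
--     rows = len(grid_lines)
--     cols = len(grid_lines[0])
--
--     rolls = {(r, c) for r in range(rows) for c in range(cols)
--              if grid_lines[r][c] == "@"}
--
--     def live_nbrs(cell, alive):
--         r, c = cell
--         n = 0
--         for dr in (-1, 0, 1):
--             for dc in (-1, 0, 1):
--                 if (dr or dc) and (r + dr, c + dc) in alive:
--                     n += 1
--         return n
--
--     result1 = sum(1 for cell in rolls if live_nbrs(cell, rolls) < 4)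
--
--     alive = set(rolls)
--     result2 = 0
--     while True:
--         doomed = {cell for cell in alive if live_nbrs(cell, alive) < 4}
--         if not doomed:
--             break
--         alive -= doomed
--         result2 += len(doomed)
--     return result1, result2
-- ===== Notes on version B (the rewrite author's own statement) =====
-- stated objective: alternative
-- what changed: Replaces the BFS worklist with decremented per-cell neighbor counters by round-based peeling: each round recomputes every survivor's live-neighbor count from scratch and removes all deficient cells at once until a fixpoint, summing the removals.
import Mathlib
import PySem

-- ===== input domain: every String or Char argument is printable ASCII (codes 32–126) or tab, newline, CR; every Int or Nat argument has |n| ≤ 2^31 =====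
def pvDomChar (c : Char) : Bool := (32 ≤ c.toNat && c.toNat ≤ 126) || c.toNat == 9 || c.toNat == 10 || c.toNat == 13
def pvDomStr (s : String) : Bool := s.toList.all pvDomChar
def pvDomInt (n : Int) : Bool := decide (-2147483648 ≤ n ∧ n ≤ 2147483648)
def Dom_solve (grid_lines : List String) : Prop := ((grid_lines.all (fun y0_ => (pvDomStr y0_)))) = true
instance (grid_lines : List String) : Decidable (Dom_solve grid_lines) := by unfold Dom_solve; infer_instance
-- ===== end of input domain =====

-- B replaces A's BFS worklist (per-cell counters decremented as peeled cells are popped) by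
-- round-based peeling recomputed from scratch each round until a fixpoint; same return value.

-- ===== PORT A =====
-- grid_lines[r][c]; none exactly where Python raises IndexError (excluded by Pre_solve)
def pvAt (g : List String) (r c : Int) : Option Char :=
  (PySem.List.pyGet? g r).bind (fun s => PySem.Str.pyGet? s c)

-- get_neighbors(r, c, rows, cols), transliterated (the generator, collected in yield order)
def pvNbrs (r c rows cols : Int) : List (Int × Int) :=
  [(-1 : Int), 0, 1].flatMap (fun x =>
    [(-1 : Int), 0, 1].filterMap (fun y =>
      if x = 0 ∧ y = 0 then none
      else
        let nx := r + x
        let ny := c + y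
        if 0 ≤ nx ∧ nx < rows ∧ 0 ≤ ny ∧ ny < cols then some (nx, ny) else none))

-- the inner "count = 0; for nr, nc in get_neighbors…: if grid…== '@': count += 1" loop
def cntA (g : List String) (rows cols : Int) (rc : Int × Int) : Int :=
  (pvNbrs rc.1 rc.2 rows cols).foldl
    (fun cnt n => if pvAt g n.1 n.2 = some '@' then cnt + 1 else cnt) 0

-- body of the initialisation loop "for r, c in paper_rolls: …" (state: neighbors, queue, discardable)
def pvInitStep (g : List String) (rows cols : Int)
    (st : PySem.Dict (Int × Int) Int × List (Int × Int) × PySem.Set (Int × Int))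
    (rc : Int × Int) :
    PySem.Dict (Int × Int) Int × List (Int × Int) × PySem.Set (Int × Int) :=
  let cnt := cntA g rows cols rc
  let nb := st.1.insert rc cnt
  if cnt < 4 then (nb, st.2.1 ++ [rc], PySem.Set.add st.2.2 rc) else (nb, st.2.1, st.2.2)

-- body of "for nr, nc in get_neighbors(r, c, …): …" inside the while loop
def pvVisit (rolls : PySem.Set (Int × Int))
    (st : PySem.Dict (Int × Int) Int × List (Int × Int) × PySem.Set (Int × Int))
    (n : Int × Int) :
    PySem.Dict (Int × Int) Int × List (Int × Int) × PySem.Set (Int × Int) :=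
  if PySem.Set.contains rolls n && ! PySem.Set.contains st.2.2 n then
    let nb' := st.1.modify n 0 (fun v => v - 1)
    if nb'.getD n 0 < 4 then (nb', st.2.1 ++ [n], PySem.Set.add st.2.2 n)
    else (nb', st.2.1, st.2.2)
  else st

-- "while queue: …" (fuel recursion; the fuel passed by solve is sufficient, see lemmas below)
def pvLoopA (rows cols : Int) (rolls : PySem.Set (Int × Int)) :
    Nat → PySem.Dict (Int × Int) Int → List (Int × Int) → PySem.Set (Int × Int) → Int → Int
  | 0, _, _, _, res => res
  | fuel + 1, nb, q, disc, res =>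
    match q with
    | [] => res
    | rc :: rest =>
      let st := (pvNbrs rc.1 rc.2 rows cols).foldl (pvVisit rolls) (nb, rest, disc)
      pvLoopA rows cols rolls fuel st.1 st.2.1 st.2.2 (res + 1)

def solve (grid_lines : List String) : Int × Int :=
  let rows : Int := grid_lines.length
  -- len(grid_lines[0]); IndexError on the empty list is excluded by Pre_solve
  let cols : Int := PySem.Str.len (grid_lines.headD "")
  let rolls : PySem.Set (Int × Int) :=
    (PySem.List.pyRange 0 rows 1).foldl (fun s r =>
      (PySem.List.pyRange 0 cols 1).foldl (fun s c =>
        if pvAt grid_lines r c = some '@' then PySem.Set.add s (r, c) else s) s)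
      PySem.Set.empty
  let init := rolls.foldl (pvInitStep grid_lines rows cols)
    (PySem.Dict.empty, ([] : List (Int × Int)), PySem.Set.empty)
  let result1 : Int := init.2.1.length
  let result2 : Int :=
    pvLoopA rows cols rolls (rolls.length + init.2.1.length + 1) init.1 init.2.1 init.2.2 0
  (result1, result2)

-- ===== PORT B =====
-- live_nbrs(cell, alive)
def pvLive (alive : PySem.Set (Int × Int)) (cell : Int × Int) : Int :=
  [(-1 : Int), 0, 1].foldl (fun n dr =>
    [(-1 : Int), 0, 1].foldl (fun n dc =>
      if (!(dr == 0 && dc == 0)) && PySem.Set.contains alive (cell.1 + dr, cell.2 + dc)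
      then n + 1 else n) n) 0

-- "while True: doomed = {…}; if not doomed: break; …" (fuel recursion, fuel sufficient)
def pvRounds : Nat → PySem.Set (Int × Int) → Int → Int
  | 0, _, acc => acc
  | fuel + 1, alive, acc =>
    let doomed : List (Int × Int) := alive.filter (fun cell => pvLive alive cell < 4)
    if doomed.isEmpty then acc
    else pvRounds fuel (PySem.Set.diff alive doomed) (acc + (doomed.length : Int))

def solve_alt (grid_lines : List String) : Int × Int :=
  let rows : Int := grid_lines.length
  let cols : Int := PySem.Str.len (grid_lines.headD "")
  let rolls : PySem.Set (Int × Int) :=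
    PySem.Set.ofList ((PySem.List.pyRange 0 rows 1).flatMap (fun r =>
      (PySem.List.pyRange 0 cols 1).filterMap (fun c =>
        if pvAt grid_lines r c = some '@' then some (r, c) else none)))
  let result1 : Int := (rolls.filter (fun cell => pvLive rolls cell < 4)).length
  let result2 : Int := pvRounds (rolls.length + 1) rolls 0
  (result1, result2)

-- ===== PRECONDITION & SPEC =====
-- Python A raises IndexError iff grid_lines is empty (grid_lines[0]) or some line is shorter
-- than the first line (grid_lines[r][c] for c < cols); Pre_solve excludes exactly those inputs.
def Pre_solve (grid_lines : List String) : Prop :=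
  grid_lines ≠ [] ∧ ∀ s ∈ grid_lines, (grid_lines.headD "").toList.length ≤ s.toList.length
instance (grid_lines : List String) : Decidable (Pre_solve grid_lines) := by
  unfold Pre_solve; infer_instance

def pvWitness_solve : List String := ["@@.", "@@@", ".@@"]

def Spec_solve (grid_lines : List String) (out : Int × Int) : Prop := out = solve_alt grid_lines
instance (grid_lines : List String) (out : Int × Int) : Decidable (Spec_solve grid_lines out) := by
  unfold Spec_solve; infer_instance

-- ===== CLAIM (what is proved, stated in full; the proofs are below) =====
def Claim_equal_solve : Prop := ∀ (grid_lines : List String), Dom_solve grid_lines →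
  Pre_solve grid_lines → Spec_solve grid_lines (solve grid_lines)

-- ===== LEMMAS AND PROOFS =====

-- proof-side notions: adjacency of two cells, number of neighbours inside a cell list
def pvAdj (m n : Int × Int) : Bool :=
  decide (m ≠ n ∧ m.1 - 1 ≤ n.1 ∧ n.1 ≤ m.1 + 1 ∧ m.2 - 1 ≤ n.2 ∧ n.2 ≤ m.2 + 1)

def pvDeg (S : List (Int × Int)) (m : Int × Int) : Nat := S.countP (pvAdj m)

def pvRollsL (g : List String) : List (Int × Int) :=
  (PySem.List.pyRange 0 (g.length : Int) 1).flatMap (fun r =>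
    (PySem.List.pyRange 0 (PySem.Str.len (g.headD "")) 1).filterMap (fun c =>
      if pvAt g r c = some '@' then some (r, c) else none))

def pvP (g : List String) : PySem.Set (Int × Int) := PySem.Set.ofList (pvRollsL g)

-- the 8 neighbour cells of m, in generator order
def pvBox (m : Int × Int) : List (Int × Int) :=
  [(m.1 + -1, m.2 + -1), (m.1 + -1, m.2 + 0), (m.1 + -1, m.2 + 1)] ++
  [(m.1 + 0, m.2 + -1), (m.1 + 0, m.2 + 1)] ++
  [(m.1 + 1, m.2 + -1), (m.1 + 1, m.2 + 0), (m.1 + 1, m.2 + 1)]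

theorem pvAdj_comm (m n : Int × Int) : pvAdj m n = pvAdj n m := by
  simp only [pvAdj, decide_eq_decide]
  constructor <;> rintro ⟨h0, h1, h2, h3, h4⟩ <;>
    exact ⟨Ne.symm h0, by omega, by omega, by omega, by omega⟩

theorem mem_pvBox (m n : Int × Int) : n ∈ pvBox m ↔ pvAdj m n = true := by
  rcases m with ⟨a, b⟩; rcases n with ⟨u, v⟩
  simp only [pvBox, List.cons_append, List.nil_append, List.mem_cons, List.not_mem_nil,
    or_false, Prod.mk.injEq, pvAdj, decide_eq_true_eq, ne_eq]
  omega

theorem nodup_pvBox (m : Int × Int) : (pvBox m).Nodup := by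
  rcases m with ⟨a, b⟩
  simp [pvBox, List.nodup_cons, List.mem_cons, Prod.ext_iff]

theorem pvNbrs_eq (r c rows cols : Int) :
    pvNbrs r c rows cols = (pvBox (r, c)).filter
      (fun n => decide (0 ≤ n.1 ∧ n.1 < rows ∧ 0 ≤ n.2 ∧ n.2 < cols)) := by
  simp only [pvNbrs, pvBox, List.flatMap_cons, List.flatMap_nil, List.append_nil,
    List.filter_append, List.append_assoc]
  congr 1
  · norm_num [List.filterMap_cons, List.filter_cons]
    split_ifs <;> rfl
  congr 1
  · norm_num [List.filterMap_cons, List.filter_cons]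
    split_ifs <;> rfl
  · norm_num [List.filterMap_cons, List.filter_cons]
    split_ifs <;> rfl

theorem nodup_pvNbrs (r c rows cols : Int) : (pvNbrs r c rows cols).Nodup := by
  rw [pvNbrs_eq]; exact (nodup_pvBox (r, c)).filter _

theorem mem_pvNbrs (r c rows cols : Int) (n : Int × Int) :
    n ∈ pvNbrs r c rows cols ↔
      (pvAdj (r, c) n = true ∧ 0 ≤ n.1 ∧ n.1 < rows ∧ 0 ≤ n.2 ∧ n.2 < cols) := by
  rw [pvNbrs_eq, List.mem_filter, mem_pvBox]
  simp

theorem countP_inter_card (A B : List (Int × Int)) (hA : A.Nodup) :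
    A.countP (fun x => decide (x ∈ B)) = (A.toFinset ∩ B.toFinset).card := by
  rw [List.countP_eq_length_filter, ← List.toFinset_card_of_nodup (hA.filter _)]
  congr 1
  ext a
  simp

theorem countP_mem_comm (S L : List (Int × Int))
    (hS : S.Nodup) (hL : L.Nodup) :
    S.countP (fun x => decide (x ∈ L)) = L.countP (fun x => decide (x ∈ S)) := by
  rw [countP_inter_card S L hS, countP_inter_card L S hL, Finset.inter_comm]

theorem pvDeg_eq_card (S : List (Int × Int)) (m : Int × Int) (h : S.Nodup) :
    pvDeg S m = (S.toFinset.filter (fun n => pvAdj m n = true)).card := by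
  rw [pvDeg, List.countP_eq_length_filter, ← List.toFinset_card_of_nodup (h.filter _)]
  congr 1
  ext a
  simp

theorem pvDeg_le_of_subset (S T : List (Int × Int)) (m : Int × Int)
    (hS : S.Nodup) (hT : T.Nodup) (hsub : ∀ x ∈ S, x ∈ T) :
    pvDeg S m ≤ pvDeg T m := by
  rw [pvDeg_eq_card _ _ hS, pvDeg_eq_card _ _ hT]
  apply Finset.card_le_card
  apply Finset.filter_subset_filter
  intro x hx
  simp only [List.mem_toFinset] at hx ⊢
  exact hsub x hx

theorem pvDeg_filter_not (P T : List (Int × Int)) (m : Int × Int)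
    (hP : P.Nodup) (hT : T.Nodup) (hsub : ∀ x ∈ T, x ∈ P) :
    (pvDeg (P.filter (fun x => decide (x ∉ T))) m : Int) = (pvDeg P m : Int) - pvDeg T m := by
  have h1 : (P.filter (fun x => decide (x ∉ T))).toFinset = P.toFinset \ T.toFinset := by
    ext a; simp
  have hfsub : T.toFinset.filter (fun n => pvAdj m n = true) ⊆
      P.toFinset.filter (fun n => pvAdj m n = true) := by
    apply Finset.filter_subset_filter
    intro x hx
    simp only [List.mem_toFinset] at hx ⊢
    exact hsub x hx
  rw [pvDeg_eq_card _ _ (hP.filter _), pvDeg_eq_card _ _ hP, pvDeg_eq_card _ _ hT, h1]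
  have h2 : (P.toFinset \ T.toFinset).filter (fun n => pvAdj m n = true)
      = P.toFinset.filter (fun n => pvAdj m n = true)
        \ T.toFinset.filter (fun n => pvAdj m n = true) := by
    ext a
    simp only [Finset.mem_sdiff, Finset.mem_filter]
    tauto
  rw [h2, Finset.card_sdiff, Finset.inter_eq_left.mpr hfsub]
  have hle := Finset.card_le_card hfsub
  omega

theorem pvDeg_disjoint_bound (P S T : List (Int × Int)) (m : Int × Int)
    (hP : P.Nodup) (hS : S.Nodup) (hT : T.Nodup)
    (hSsub : ∀ x ∈ S, x ∈ P) (hTsub : ∀ x ∈ T, x ∈ P) (hdisj : ∀ x ∈ S, x ∉ T) :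
    (pvDeg S m : Int) ≤ (pvDeg P m : Int) - pvDeg T m := by
  have h1 : pvDeg S m ≤ pvDeg (P.filter (fun x => decide (x ∉ T))) m := by
    apply pvDeg_le_of_subset _ _ _ hS (hP.filter _)
    intro x hx
    simp only [List.mem_filter, decide_eq_true_eq]
    exact ⟨hSsub x hx, hdisj x hx⟩
  have h2 := pvDeg_filter_not P T m hP hT hTsub
  omega

theorem countP_not_aux {α : Type} (p : α → Bool) (l : List α) :
    l.countP p + l.countP (fun a => !p a) = l.length := by
  induction l with
  | nil => simp
  | cons a t ih =>
    by_cases h : p a = true <;> simp [h] <;> omega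

theorem length_filter_not_mem (P T : List (Int × Int))
    (hP : P.Nodup) (hT : T.Nodup) (hsub : ∀ x ∈ T, x ∈ P) :
    (P.filter (fun x => decide (x ∉ T))).length + T.length = P.length := by
  have h1 : (P.filter (fun x => decide (x ∉ T))).length
      = P.countP (fun x => !decide (x ∈ T)) := by
    rw [← List.countP_eq_length_filter]
    apply List.countP_congr
    intro x _
    simp
  have h2 : P.countP (fun x => decide (x ∈ T)) = T.countP (fun x => decide (x ∈ P)) :=
    countP_mem_comm P T hP hT
  have h3 : T.countP (fun x => decide (x ∈ P)) = T.length := by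
    rw [List.countP_eq_length_filter, List.filter_eq_self.mpr]
    intro x hx
    simpa using hsub x hx
  have h4 := countP_not_aux (fun x => decide (x ∈ T)) P
  omega

theorem length_eq_of_mem_iff (S T : List (Int × Int))
    (hS : S.Nodup) (hT : T.Nodup) (hiff : ∀ x, x ∈ S ↔ x ∈ T) :
    S.length = T.length := by
  rw [← List.toFinset_card_of_nodup hS, ← List.toFinset_card_of_nodup hT]
  congr 1
  ext a
  simp [hiff a]

theorem pv_contains_eq {α : Type} [BEq α] [LawfulBEq α] (s : PySem.Set α) (x : α) :
    PySem.Set.contains s x = decide (x ∈ s) := by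
  simp only [PySem.Set.contains]
  exact List.contains_eq_mem x s

theorem pv_add_fresh {α : Type} [BEq α] [LawfulBEq α] (s : PySem.Set α) (x : α)
    (h : x ∉ s) : PySem.Set.add s x = s ++ [x] := by
  simp [PySem.Set.add, h]

theorem ite_acc_eq (c : Bool) (x : Int) :
    (if c = true then x + 1 else x) = x + (if c = true then 1 else 0) := by
  cases c <;> simp

theorem pvLive_eq (alive : List (Int × Int)) (m : Int × Int) (h : alive.Nodup) :
    pvLive alive m = (pvDeg alive m : Int) := by
  have hbox : pvLive alive m = ((pvBox m).countP (fun n => decide (n ∈ alive)) : Int) := by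
    rcases m with ⟨a, b⟩
    simp only [pvLive, List.foldl_cons, List.foldl_nil, ite_acc_eq]
    norm_num [pvBox, List.countP_cons, pv_contains_eq]
    ring
  rw [hbox, countP_mem_comm _ _ (nodup_pvBox m) h]
  congr 1
  apply List.countP_congr
  intro x _
  simp [mem_pvBox]

theorem mem_pvP (g : List String) (x : Int × Int) :
    x ∈ pvP g ↔ (0 ≤ x.1 ∧ x.1 < (g.length : Int) ∧ 0 ≤ x.2 ∧
      x.2 < PySem.Str.len (g.headD "") ∧ pvAt g x.1 x.2 = some '@') := by
  rcases x with ⟨u, v⟩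
  simp only [pvP, PySem.Set.mem_ofList, pvRollsL, List.mem_flatMap, List.mem_filterMap,
    PySem.List.mem_pyRange_one]
  constructor
  · rintro ⟨r, hr, c, hc, hif⟩
    split_ifs at hif with hat
    · have he : (r, c) = (u, v) := Option.some.inj hif
      have hu : r = u := congrArg Prod.fst he
      have hv : c = v := congrArg Prod.snd he
      subst hu
      subst hv
      exact ⟨hr.1, hr.2, hc.1, hc.2, hat⟩
  · rintro ⟨h1, h2, h3, h4, h5⟩
    exact ⟨u, ⟨h1, h2⟩, v, ⟨h3, h4⟩, by simp [h5]⟩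

theorem nodup_pvP (g : List String) : (pvP g).Nodup := PySem.Set.nodup_ofList _

theorem foldl_add_if_eq_update {α β : Type} [BEq β] (l : List α) (p : α → Prop)
    [DecidablePred p] (f : α → β) (s : PySem.Set β) :
    l.foldl (fun s x => if p x then PySem.Set.add s (f x) else s) s
      = PySem.Set.update s (l.filterMap (fun x => if p x then some (f x) else none)) := by
  induction l generalizing s with
  | nil => rfl
  | cons a t ih =>
    by_cases hp : p a
    · rw [List.foldl_cons, if_pos hp,
        List.filterMap_cons_some (by rw [if_pos hp]), ih]
      rfl
    · rw [List.foldl_cons, if_neg hp,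
        List.filterMap_cons_none (by rw [if_neg hp]), ih]

theorem foldl_update_flatMap {α β : Type} [BEq β] (l : List α) (h : α → List β)
    (s : PySem.Set β) :
    l.foldl (fun s x => PySem.Set.update s (h x)) s = PySem.Set.update s (l.flatMap h) := by
  induction l generalizing s with
  | nil => rfl
  | cons a t ih =>
    rw [List.foldl_cons, List.flatMap_cons, ih]
    simp only [PySem.Set.update, List.foldl_append]

theorem rollsA_eq (g : List String) :
    (PySem.List.pyRange 0 (g.length : Int) 1).foldl (fun s r =>
      (PySem.List.pyRange 0 (PySem.Str.len (g.headD "")) 1).foldl (fun s c =>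
        if pvAt g r c = some '@' then PySem.Set.add s (r, c) else s) s)
      PySem.Set.empty = pvP g := by
  have hin : (fun (s : PySem.Set (Int × Int)) (r : Int) =>
      (PySem.List.pyRange 0 (PySem.Str.len (g.headD "")) 1).foldl (fun s c =>
        if pvAt g r c = some '@' then PySem.Set.add s (r, c) else s) s)
      = fun s r => PySem.Set.update s
          ((PySem.List.pyRange 0 (PySem.Str.len (g.headD "")) 1).filterMap (fun c =>
            if pvAt g r c = some '@' then some (r, c) else none)) := by
    funext s r
    exact foldl_add_if_eq_update _ _ _ _
  rw [hin, foldl_update_flatMap]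
  rfl

theorem cntA_eq (g : List String) (m : Int × Int) (_hm : m ∈ pvP g) :
    cntA g (g.length : Int) (PySem.Str.len (g.headD "")) m = (pvDeg (pvP g) m : Int) := by
  have h0 : cntA g (g.length : Int) (PySem.Str.len (g.headD "")) m
      = ((pvNbrs m.1 m.2 (g.length : Int) (PySem.Str.len (g.headD ""))).countP
          (fun n => decide (pvAt g n.1 n.2 = some '@')) : Int) := by
    rw [cntA]
    rw [show (fun (cnt : Int) (n : Int × Int) =>
          if pvAt g n.1 n.2 = some '@' then cnt + 1 else cnt)
        = fun (cnt : Int) (n : Int × Int) =>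
          if (fun k : Int × Int => decide (pvAt g k.1 k.2 = some '@')) n = true
          then cnt + 1 else cnt from by funext cnt n; simp]
    rw [PySem.List.foldl_count_if]
    ring
  rw [h0]
  have h1 : (pvNbrs m.1 m.2 (g.length : Int) (PySem.Str.len (g.headD ""))).countP
        (fun n => decide (pvAt g n.1 n.2 = some '@'))
      = (pvNbrs m.1 m.2 (g.length : Int) (PySem.Str.len (g.headD ""))).countP
        (fun n => decide (n ∈ pvP g)) := by
    apply List.countP_congr
    intro n hn
    rw [mem_pvNbrs] at hn
    simp only [decide_eq_true_eq]
    rw [mem_pvP]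
    constructor
    · intro hat
      exact ⟨hn.2.1, hn.2.2.1, hn.2.2.2.1, hn.2.2.2.2, hat⟩
    · intro hmem
      exact hmem.2.2.2.2
  rw [h1, countP_mem_comm _ _ (nodup_pvNbrs _ _ _ _) (nodup_pvP g)]
  congr 1
  apply List.countP_congr
  intro n hn
  simp only [decide_eq_true_eq]
  rw [mem_pvNbrs]
  have hb := (mem_pvP g n).mp hn
  constructor
  · intro hx
    have h := hx.1
    simpa using h
  · intro hx
    refine ⟨by simpa using hx, hb.1, hb.2.1, hb.2.2.1, hb.2.2.2.1⟩

theorem initA_spec (g : List String) (rows cols : Int) :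
    ∀ (l : List (Int × Int)) (nb : PySem.Dict (Int × Int) Int) (q : List (Int × Int))
      (disc : PySem.Set (Int × Int)),
      l.Nodup → (∀ rc ∈ l, rc ∉ disc) →
      (l.foldl (pvInitStep g rows cols) (nb, q, disc)).2.1
          = q ++ l.filter (fun rc => decide (cntA g rows cols rc < 4)) ∧
      (l.foldl (pvInitStep g rows cols) (nb, q, disc)).2.2
          = disc ++ l.filter (fun rc => decide (cntA g rows cols rc < 4)) ∧
      (∀ m, (l.foldl (pvInitStep g rows cols) (nb, q, disc)).1.getD m 0
          = if m ∈ l then cntA g rows cols m else nb.getD m 0) := by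
  intro l
  induction l with
  | nil =>
    intro nb q disc _ _
    simp
  | cons rc t ih =>
    intro nb q disc hnd hf
    have hrc_t : rc ∉ t := (List.nodup_cons.mp hnd).1
    have htnd : t.Nodup := (List.nodup_cons.mp hnd).2
    have hrcd : rc ∉ disc := hf rc List.mem_cons_self
    rw [List.foldl_cons]
    by_cases hc : cntA g rows cols rc < 4
    · have hstep : pvInitStep g rows cols (nb, q, disc) rc
          = (nb.insert rc (cntA g rows cols rc), q ++ [rc], disc ++ [rc]) := by
        simp only [pvInitStep]
        rw [if_pos hc, pv_add_fresh _ _ hrcd]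
      rw [hstep]
      obtain ⟨ih1, ih2, ih3⟩ := ih (nb.insert rc (cntA g rows cols rc)) (q ++ [rc])
        (disc ++ [rc]) htnd (by
          intro x hx hmem
          rcases List.mem_append.mp hmem with h | h
          · exact hf x (List.mem_cons_of_mem _ hx) h
          · exact hrc_t ((List.mem_singleton.mp h) ▸ hx))
      refine ⟨?_, ?_, ?_⟩
      · rw [ih1, List.filter_cons, if_pos (by simpa using hc)]
        simp
      · rw [ih2, List.filter_cons, if_pos (by simpa using hc)]
        simp
      · intro m
        rw [ih3 m]
        by_cases hmt : m ∈ t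
        · simp [hmt]
        · by_cases hmrc : m = rc
          · subst hmrc
            simp [hmt, PySem.Dict.getD_insert]
          · simp only [List.mem_cons, hmt, hmrc, or_self, if_false, PySem.Dict.getD_insert,
              if_neg hmrc]
    · have hstep : pvInitStep g rows cols (nb, q, disc) rc
          = (nb.insert rc (cntA g rows cols rc), q, disc) := by
        simp only [pvInitStep]
        rw [if_neg hc]
      rw [hstep]
      obtain ⟨ih1, ih2, ih3⟩ := ih (nb.insert rc (cntA g rows cols rc)) q disc htnd
        (fun x hx => hf x (List.mem_cons_of_mem _ hx))
      refine ⟨?_, ?_, ?_⟩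
      · rw [ih1, List.filter_cons, if_neg (by simpa using hc)]
      · rw [ih2, List.filter_cons, if_neg (by simpa using hc)]
      · intro m
        rw [ih3 m]
        by_cases hmt : m ∈ t
        · simp [hmt]
        · by_cases hmrc : m = rc
          · subst hmrc
            simp [hmt, PySem.Dict.getD_insert]
          · simp only [List.mem_cons, hmt, hmrc, or_self, if_false, PySem.Dict.getD_insert,
              if_neg hmrc]

theorem pvRounds_spec : ∀ (fuel : Nat) (alive : List (Int × Int)) (acc : Int),
    alive.Nodup → alive.length < fuel →
    ∃ S : List (Int × Int),
      pvRounds fuel alive acc = acc + ((alive.length : Int) - (S.length : Int)) ∧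
      S.Nodup ∧ (∀ m ∈ S, m ∈ alive) ∧
      (∀ m ∈ S, 4 ≤ pvDeg S m) ∧
      (∀ G : List (Int × Int), G.Nodup → (∀ m ∈ G, m ∈ alive) →
        (∀ m ∈ G, 4 ≤ pvDeg G m) → ∀ m ∈ G, m ∈ S) := by
  intro fuel
  induction fuel with
  | zero =>
    intro alive acc _ hlt
    exact absurd hlt (Nat.not_lt_zero _)
  | succ f ih =>
    intro alive acc hnd hlt
    by_cases hem : (alive.filter (fun cell => pvLive alive cell < 4)).isEmpty = true
    · refine ⟨alive, ?_, hnd, fun m hm => hm, ?_, fun G _ hsub _ m hm => hsub m hm⟩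
      · show pvRounds (f + 1) alive acc = _
        simp only [pvRounds]
        rw [if_pos hem]
        ring
      · intro m hm
        rw [List.isEmpty_iff, List.filter_eq_nil_iff] at hem
        have h1 := hem m hm
        simp only [decide_eq_true_eq, not_lt] at h1
        have h2 := pvLive_eq alive m hnd
        omega
    · have hsteq : PySem.Set.diff alive (alive.filter (fun cell => pvLive alive cell < 4))
          = alive.filter (fun x => !decide (pvLive alive x < 4)) := by
        show List.filter _ alive = _
        apply List.filter_congr
        intro x hx
        rw [pv_contains_eq]
        congr 1
        rw [decide_eq_decide]
        rw [List.mem_filter]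
        simp [hx]
      have hlen : (alive.filter (fun cell => pvLive alive cell < 4)).length
          + (PySem.Set.diff alive (alive.filter (fun cell => pvLive alive cell < 4))).length
          = alive.length := by
        rw [hsteq]
        have h1 := List.countP_eq_length_filter
          (l := alive) (p := fun cell => decide (pvLive alive cell < 4))
        have h2 := List.countP_eq_length_filter
          (l := alive) (p := fun x => !decide (pvLive alive x < 4))
        have h3 := countP_not_aux (fun cell => decide (pvLive alive cell < 4)) alive
        omega
      have hdne : (alive.filter (fun cell => pvLive alive cell < 4)) ≠ [] := by
        simpa [List.isEmpty_iff] using hem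
      have hdpos : 0 < (alive.filter (fun cell => pvLive alive cell < 4)).length :=
        List.length_pos_of_ne_nil hdne
      have hnd' : (PySem.Set.diff alive (alive.filter (fun cell => pvLive alive cell < 4))).Nodup := by
        rw [hsteq]; exact hnd.filter _
      obtain ⟨S, hS1, hS2, hS3, hS4, hS5⟩ := ih
        (PySem.Set.diff alive (alive.filter (fun cell => pvLive alive cell < 4)))
        (acc + ((alive.filter (fun cell => pvLive alive cell < 4)).length : Int))
        hnd' (by omega)
      refine ⟨S, ?_, hS2, ?_, hS4, ?_⟩
      · show pvRounds (f + 1) alive acc = _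
        simp only [pvRounds]
        rw [if_neg hem, hS1]
        have hc1 : ((PySem.Set.diff alive (alive.filter (fun cell => pvLive alive cell < 4))).length : Int)
            = (alive.length : Int) - ((alive.filter (fun cell => pvLive alive cell < 4)).length : Int) := by
          omega
        rw [hc1]
        ring
      · intro m hm
        have h := hS3 m hm
        rw [hsteq] at h
        exact (List.mem_filter.mp h).1
      · intro G hGnd hGsub hGgood m hm
        apply hS5 G hGnd ?_ hGgood m hm
        intro x hx
        have hxal : x ∈ alive := hGsub x hx
        have h4 : 4 ≤ pvDeg G x := hGgood x hx
        have h5 : pvDeg G x ≤ pvDeg alive x := pvDeg_le_of_subset G alive x hGnd hnd hGsub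
        have h6 := pvLive_eq alive x hnd
        rw [hsteq, List.mem_filter]
        refine ⟨hxal, ?_⟩
        simp only [Bool.not_eq_true', decide_eq_false_iff_not]
        omega

theorem pvDeg_popped_step (disc rest : List (Int × Int)) (rc m : Int × Int)
    (hdnd : disc.Nodup) (hrcd : rc ∈ disc) (hrcr : rc ∉ rest) :
    (pvDeg (disc.filter (fun x => decide (x ∉ rest))) m : Int)
      = (pvDeg (disc.filter (fun x => decide (x ∉ rc :: rest))) m : Int)
        + (if pvAdj m rc then 1 else 0) := by
  revert hdnd hrcd
  induction disc with
  | nil =>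
    intro _ h
    cases h
  | cons d t ih =>
    intro hdnd hrcd
    have hdt : d ∉ t := (List.nodup_cons.mp hdnd).1
    have htnd : t.Nodup := (List.nodup_cons.mp hdnd).2
    by_cases hdrc : d = rc
    · subst hdrc
      rw [List.filter_cons, List.filter_cons, if_pos (by simpa using hrcr),
        if_neg (by simp)]
      have heq : t.filter (fun x => decide (x ∉ rest))
          = t.filter (fun x => decide (x ∉ d :: rest)) := by
        apply List.filter_congr
        intro x hx
        have hxd : x ≠ d := fun he => hdt (he ▸ hx)
        simp [List.mem_cons, hxd]
      simp only [pvDeg, List.countP_cons, heq]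
      by_cases hadj : pvAdj m d = true <;> simp [hadj]
    · have hrct : rc ∈ t := by
        rcases List.mem_cons.mp hrcd with h | h
        · exact absurd h.symm hdrc
        · exact h
      have hcond : (decide (d ∉ rc :: rest)) = (decide (d ∉ rest)) := by
        rw [decide_eq_decide]
        simp [List.mem_cons, hdrc]
      have := ih htnd hrct
      by_cases hb : d ∉ rest
      · rw [List.filter_cons, List.filter_cons, if_pos (by simpa using hb),
          if_pos (by rw [hcond]; simpa using hb)]
        simp only [pvDeg, List.countP_cons] at this ⊢
        by_cases hadj : pvAdj m d = true <;> simp [hadj] at this ⊢ <;> omega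
      · rw [List.filter_cons, List.filter_cons, if_neg (by simpa using hb),
          if_neg (by rw [hcond]; simpa using hb)]
        exact this

theorem foldVisit_spec (rows cols : Int) (P SB : List (Int × Int))
    (hPnd : P.Nodup) (hSBnd : SB.Nodup) (hSBsub : ∀ m ∈ SB, m ∈ P)
    (hSBgood : ∀ m ∈ SB, 4 ≤ pvDeg SB m)
    (rc : Int × Int)
    (rest disc : List (Int × Int))
    (hdsub : ∀ m ∈ disc, m ∈ P) (hdnd : disc.Nodup) (hdSB : ∀ m ∈ disc, m ∉ SB) :
    ∀ (ns pre : List (Int × Int)), pvNbrs rc.1 rc.2 rows cols = pre ++ ns →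
    ∀ (st : PySem.Dict (Int × Int) Int × List (Int × Int) × PySem.Set (Int × Int))
      (app : List (Int × Int)),
      st.2.1 = rest ++ app → st.2.2 = disc ++ app → app.Nodup →
      (∀ m ∈ app, m ∈ P ∧ m ∉ disc ∧ m ∉ SB) →
      (∀ m ∈ P, m ∉ disc → m ∉ app →
        st.1.getD m 0 = (pvDeg P m : Int)
            - (pvDeg (disc.filter (fun x => decide (x ∉ rest))) m : Int)
            + (if m ∈ ns then 1 else 0)
        ∧ 4 ≤ st.1.getD m 0) →
    ∃ app' : List (Int × Int),
      (ns.foldl (pvVisit P) st).2.1 = rest ++ app' ∧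
      (ns.foldl (pvVisit P) st).2.2 = disc ++ app' ∧
      app'.Nodup ∧ (∀ m ∈ app', m ∈ P ∧ m ∉ disc ∧ m ∉ SB) ∧
      (∀ m ∈ P, m ∉ disc → m ∉ app' →
        (ns.foldl (pvVisit P) st).1.getD m 0 = (pvDeg P m : Int)
            - (pvDeg (disc.filter (fun x => decide (x ∉ rest))) m : Int)
        ∧ 4 ≤ (ns.foldl (pvVisit P) st).1.getD m 0) := by
  intro ns
  induction ns with
  | nil =>
    intro pre hpre st app h1 h2 h3 h4 h5
    refine ⟨app, h1, h2, h3, h4, ?_⟩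
    intro m hm hd ha
    have h := h5 m hm hd ha
    simpa using h
  | cons n ns' ih =>
    intro pre hpre st app h1 h2 h3 h4 h5
    rw [List.foldl_cons]
    have hpre' : pvNbrs rc.1 rc.2 rows cols = (pre ++ [n]) ++ ns' := by
      rw [hpre]
      simp
    have hn_ns' : n ∉ ns' := by
      have hnodup := nodup_pvNbrs rc.1 rc.2 rows cols
      rw [hpre] at hnodup
      have h := (List.nodup_append.mp hnodup).2.1
      exact (List.nodup_cons.mp h).1
    by_cases hg : n ∈ P ∧ n ∉ disc ++ app
    · have hgb : (PySem.Set.contains P n && ! PySem.Set.contains st.2.2 n) = true := by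
        rw [h2, pv_contains_eq, pv_contains_eq]
        simp [hg.1, hg.2]
      have hnP := hg.1
      have hnd_ : n ∉ disc := fun h => hg.2 (List.mem_append_left _ h)
      have hna : n ∉ app := fun h => hg.2 (List.mem_append_right _ h)
      obtain ⟨hval, hge⟩ := h5 n hnP hnd_ hna
      have hvn : (st.1.modify n 0 (fun v => v - 1)).getD n 0
          = (pvDeg P n : Int)
            - (pvDeg (disc.filter (fun x => decide (x ∉ rest))) n : Int) := by
        rw [PySem.Dict.getD_modify, if_pos rfl]
        simp only [hval]
        rw [show (if n ∈ n :: ns' then (1 : Int) else 0) = 1 from by simp]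
        ring
      by_cases hlt : (st.1.modify n 0 (fun v => v - 1)).getD n 0 < 4
      · -- n is appended to queue and discardable
        have hfresh : n ∉ st.2.2 := by rw [h2]; exact hg.2
        have hstep : pvVisit P st n
            = (st.1.modify n 0 (fun v => v - 1), st.2.1 ++ [n], st.2.2 ++ [n]) := by
          simp only [pvVisit]
          rw [if_pos hgb, if_pos hlt, pv_add_fresh _ _ hfresh]
        rw [hstep]
        have hnSB : n ∉ SB := by
          intro hnsb
          have hb := pvDeg_disjoint_bound P SB
            (disc.filter (fun x => decide (x ∉ rest))) n hPnd hSBnd (hdnd.filter _)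
            hSBsub (fun x hx => hdsub x (List.mem_filter.mp hx).1)
            (fun x hx hxT => hdSB x (List.mem_filter.mp hxT).1 hx)
          have h4' := hSBgood n hnsb
          omega
        apply ih (pre ++ [n]) hpre'
          (st.1.modify n 0 (fun v => v - 1), st.2.1 ++ [n], st.2.2 ++ [n]) (app ++ [n])
        · rw [h1]; simp
        · rw [h2]; simp
        · refine List.Nodup.append h3 (List.nodup_singleton n) ?_
          intro a ha hb
          rw [List.mem_singleton] at hb
          exact hna (hb ▸ ha)
        · intro m hm
          rcases List.mem_append.mp hm with hma | hmn
          · exact h4 m hma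
          · rw [List.mem_singleton] at hmn
            subst hmn
            exact ⟨hnP, hnd_, hnSB⟩
        · intro m hm hmd hma
          have hmapp : m ∉ app := fun h => hma (List.mem_append_left _ h)
          have hmn : m ≠ n := by
            intro he
            exact hma (by rw [he]; exact List.mem_append_right _ (List.mem_singleton_self n))
          obtain ⟨he, hge'⟩ := h5 m hm hmd hmapp
          constructor
          · rw [PySem.Dict.getD_modify, if_neg hmn, he]
            congr 1
            simp [List.mem_cons, hmn]
          · rw [PySem.Dict.getD_modify, if_neg hmn]
            exact hge'
      · -- counter decremented but n stays
        have hstep : pvVisit P st n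
            = (st.1.modify n 0 (fun v => v - 1), st.2.1, st.2.2) := by
          simp only [pvVisit]
          rw [if_pos hgb, if_neg hlt]
        rw [hstep]
        apply ih (pre ++ [n]) hpre' (st.1.modify n 0 (fun v => v - 1), st.2.1, st.2.2) app
          h1 h2 h3 h4
        intro m hm hmd hma
        by_cases hmn : m = n
        · constructor
          · rw [hmn]
            show (st.1.modify n 0 (fun v => v - 1)).getD n 0 = _
            rw [hvn]
            have h' : (if n ∈ ns' then (1 : Int) else 0) = 0 := by simp [hn_ns']
            rw [h']
            ring
          · rw [hmn]
            show (4 : Int) ≤ (st.1.modify n 0 (fun v => v - 1)).getD n 0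
            omega
        · obtain ⟨he, hge'⟩ := h5 m hm hmd hma
          constructor
          · rw [PySem.Dict.getD_modify, if_neg hmn, he]
            congr 1
            simp [List.mem_cons, hmn]
          · rw [PySem.Dict.getD_modify, if_neg hmn]
            exact hge'
    · -- guard false: state unchanged
      have hgb : (PySem.Set.contains P n && ! PySem.Set.contains st.2.2 n) = false := by
        rw [h2, pv_contains_eq, pv_contains_eq]
        by_cases hp : n ∈ P
        · have hq : n ∈ disc ++ app := by
            by_contra hq
            exact hg ⟨hp, hq⟩
          simp [hp, hq]
        · simp [hp]
      have hstep : pvVisit P st n = st := by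
        simp only [pvVisit]
        rw [if_neg (by rw [hgb]; simp)]
      rw [hstep]
      apply ih (pre ++ [n]) hpre' st app h1 h2 h3 h4
      intro m hm hmd hma
      have hmn : m ≠ n := by
        intro he
        subst he
        by_cases hp : m ∈ P
        · have hq : m ∈ disc ++ app := by
            by_contra hq
            exact hg ⟨hp, hq⟩
          rcases List.mem_append.mp hq with h | h
          · exact hmd h
          · exact hma h
        · exact hp hm
      obtain ⟨he, hge'⟩ := h5 m hm hmd hma
      constructor
      · rw [he]
        congr 1
        simp [List.mem_cons, hmn]
      · exact hge'

theorem pvLoopA_spec (rows cols : Int) (P SB : List (Int × Int))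
    (hPnd : P.Nodup) (hSBnd : SB.Nodup) (hSBsub : ∀ m ∈ SB, m ∈ P)
    (hSBgood : ∀ m ∈ SB, 4 ≤ pvDeg SB m)
    (hPN : ∀ m ∈ P, ∀ n ∈ P, (m ∈ pvNbrs n.1 n.2 rows cols ↔ pvAdj n m = true)) :
    ∀ (fuel : Nat) (nb : PySem.Dict (Int × Int) Int) (q disc : List (Int × Int)) (res : Int),
    (∀ m ∈ disc, m ∈ P) → disc.Nodup → (∀ m ∈ q, m ∈ disc) → q.Nodup →
    (∀ m ∈ disc, m ∉ SB) →
    (∀ m ∈ P, m ∉ disc →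
      nb.getD m 0 = (pvDeg P m : Int)
          - (pvDeg (disc.filter (fun x => decide (x ∉ q))) m : Int)
      ∧ 4 ≤ nb.getD m 0) →
    res + (q.length : Int) = (disc.length : Int) →
    q.length + (P.filter (fun m => decide (m ∉ disc))).length < fuel →
    ∃ disc' : List (Int × Int),
      pvLoopA rows cols P fuel nb q disc res = (disc'.length : Int) ∧
      disc'.Nodup ∧ (∀ m ∈ disc', m ∈ P) ∧ (∀ m ∈ disc', m ∉ SB) ∧
      (∀ m ∈ P, m ∉ disc' → 4 ≤ (pvDeg P m : Int) - (pvDeg disc' m : Int)) := by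
  intro fuel
  induction fuel with
  | zero =>
    intro nb q disc res _ _ _ _ _ _ _ hfuel
    exact absurd hfuel (Nat.not_lt_zero _)
  | succ f ih =>
    intro nb q disc res hdsub hdnd hqsub hqnd hdSB hcnt hres hfuel
    rcases q with _ | ⟨rc, rest⟩
    · refine ⟨disc, ?_, hdnd, hdsub, hdSB, ?_⟩
      · show res = _
        simp only [List.length_nil, Nat.cast_zero, add_zero] at hres
        exact hres
      · intro m hm hnd_
        obtain ⟨he, hge⟩ := hcnt m hm hnd_
        have hfe : disc.filter (fun x => decide (x ∉ ([] : List (Int × Int)))) = disc := by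
          apply List.filter_eq_self.mpr
          intro x _
          simp
        rw [hfe] at he
        omega
    · have hrcd : rc ∈ disc := hqsub rc List.mem_cons_self
      have hrcr : rc ∉ rest := (List.nodup_cons.mp hqnd).1
      have hrestnd : rest.Nodup := (List.nodup_cons.mp hqnd).2
      have hrcP : rc ∈ P := hdsub rc hrcd
      have h5init : ∀ m ∈ P, m ∉ disc → m ∉ ([] : List (Int × Int)) →
          ((nb, rest, (disc : PySem.Set (Int × Int))) :
            PySem.Dict (Int × Int) Int × List (Int × Int) × PySem.Set (Int × Int)).1.getD m 0
            = (pvDeg P m : Int)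
              - (pvDeg (disc.filter (fun x => decide (x ∉ rest))) m : Int)
              + (if m ∈ pvNbrs rc.1 rc.2 rows cols then 1 else 0)
          ∧ 4 ≤ ((nb, rest, (disc : PySem.Set (Int × Int))) :
            PySem.Dict (Int × Int) Int × List (Int × Int) × PySem.Set (Int × Int)).1.getD m 0 := by
        intro m hm hnd_ _
        obtain ⟨he, hge⟩ := hcnt m hm hnd_
        have hstep := pvDeg_popped_step disc rest rc m hdnd hrcd hrcr
        have hind : (if m ∈ pvNbrs rc.1 rc.2 rows cols then (1 : Int) else 0)
            = (if pvAdj m rc then 1 else 0) := by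
          by_cases hmem : m ∈ pvNbrs rc.1 rc.2 rows cols
          · rw [if_pos hmem, if_pos]
            rw [pvAdj_comm]
            exact (hPN m hm rc hrcP).mp hmem
          · rw [if_neg hmem, if_neg]
            intro hadj
            apply hmem
            apply (hPN m hm rc hrcP).mpr
            rw [pvAdj_comm]
            exact hadj
        refine ⟨?_, hge⟩
        rw [he, hind, hstep]
        ring
      obtain ⟨app', hA1, hA2, hA3, hA4, hA5⟩ := foldVisit_spec rows cols P SB hPnd hSBnd
        hSBsub hSBgood rc rest disc hdsub hdnd hdSB
        (pvNbrs rc.1 rc.2 rows cols) [] rfl (nb, rest, disc) []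
        (by simp) (by simp) List.nodup_nil (by simp) h5init
      have happP : ∀ m ∈ app', m ∈ P := fun m hm => (hA4 m hm).1
      have happd : ∀ m ∈ app', m ∉ disc := fun m hm => (hA4 m hm).2.1
      have happSB : ∀ m ∈ app', m ∉ SB := fun m hm => (hA4 m hm).2.2
      have hunf : pvLoopA rows cols P (f + 1) nb (rc :: rest) disc res
          = pvLoopA rows cols P f
              ((pvNbrs rc.1 rc.2 rows cols).foldl (pvVisit P) (nb, rest, disc)).1
              ((pvNbrs rc.1 rc.2 rows cols).foldl (pvVisit P) (nb, rest, disc)).2.1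
              ((pvNbrs rc.1 rc.2 rows cols).foldl (pvVisit P) (nb, rest, disc)).2.2
              (res + 1) := rfl
      rw [hunf, hA1, hA2]
      have hfilter_eq : (disc ++ app').filter (fun x => decide (x ∉ rest ++ app'))
          = disc.filter (fun x => decide (x ∉ rest)) := by
        rw [List.filter_append]
        have hx1 : app'.filter (fun x => decide (x ∉ rest ++ app')) = [] := by
          apply List.filter_eq_nil_iff.mpr
          intro a ha
          simp only [decide_eq_true_eq, Decidable.not_not]
          exact List.mem_append_right _ ha
        have hx2 : disc.filter (fun x => decide (x ∉ rest ++ app'))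
            = disc.filter (fun x => decide (x ∉ rest)) := by
          apply List.filter_congr
          intro x hx
          have hxa : x ∉ app' := fun hmem => happd x hmem hx
          simp [List.mem_append, hxa]
        rw [hx1, hx2, List.append_nil]
      have hlen2 : (P.filter (fun x => decide (x ∉ disc ++ app'))).length + app'.length
          = (P.filter (fun x => decide (x ∉ disc))).length := by
        have e1 : P.filter (fun x => decide (x ∉ disc ++ app'))
            = (P.filter (fun x => decide (x ∉ disc))).filter
                (fun x => decide (x ∉ app')) := by
          rw [List.filter_filter]
          apply List.filter_congr
          intro x _
          by_cases hx1 : x ∈ disc <;> by_cases hx2 : x ∈ app' <;>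
            simp [List.mem_append, hx1, hx2]
        have e2 := length_filter_not_mem (P.filter (fun x => decide (x ∉ disc))) app'
          (hPnd.filter _) hA3 (fun x hx => by
            rw [List.mem_filter]
            exact ⟨happP x hx, by simpa using happd x hx⟩)
        rw [e1]
        omega
      apply ih _ (rest ++ app') (disc ++ app') (res + 1)
      · intro m hm
        rcases List.mem_append.mp hm with h | h
        · exact hdsub m h
        · exact happP m h
      · exact List.Nodup.append hdnd hA3 (fun a ha hb => happd a hb ha)
      · intro m hm
        rcases List.mem_append.mp hm with h | h
        · exact List.mem_append_left _ (hqsub m (List.mem_cons_of_mem _ h))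
        · exact List.mem_append_right _ h
      · exact List.Nodup.append hrestnd hA3
          (fun a ha hb => happd a hb (hqsub a (List.mem_cons_of_mem _ ha)))
      · intro m hm
        rcases List.mem_append.mp hm with h | h
        · exact hdSB m h
        · exact happSB m h
      · intro m hm hmd
        have hmdisc : m ∉ disc := fun h => hmd (List.mem_append_left _ h)
        have hmapp : m ∉ app' := fun h => hmd (List.mem_append_right _ h)
        obtain ⟨he, hge⟩ := hA5 m hm hmdisc hmapp
        rw [hfilter_eq]
        exact ⟨he, hge⟩
      · simp only [List.length_append, List.length_cons] at hres ⊢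
        push_cast at hres ⊢
        omega
      · simp only [List.length_append, List.length_cons] at hfuel ⊢
        omega

-- ===== VERDICT (by name: the statement is the Claim_ definition above) =====
theorem solve_spec : Claim_equal_solve := by
  intro g _ hpre
  unfold Spec_solve
  obtain ⟨hne, hlen⟩ := hpre
  have hPnd := nodup_pvP g
  have hPN : ∀ m ∈ pvP g, ∀ n ∈ pvP g,
      (m ∈ pvNbrs n.1 n.2 (g.length : Int) (PySem.Str.len (g.headD "")) ↔ pvAdj n m = true) := by
    intro m hm n hn
    have hbm := (mem_pvP g m).mp hm
    rw [mem_pvNbrs]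
    constructor
    · intro h
      have h' := h.1
      simpa using h'
    · intro h
      refine ⟨by simpa using h, hbm.1, hbm.2.1, hbm.2.2.1, hbm.2.2.2.1⟩
  obtain ⟨SB, hB1, hB2, hB3, hB4, hB5⟩ := pvRounds_spec ((pvP g).length + 1) (pvP g) 0
    hPnd (by omega)
  -- the two ports, reduced to their components
  have hrolls := rollsA_eq g
  have hA : solve g
      = ((((pvP g).foldl (pvInitStep g (g.length : Int) (PySem.Str.len (g.headD "")))
            (PySem.Dict.empty, [], PySem.Set.empty)).2.1.length : Int),
         pvLoopA (g.length : Int) (PySem.Str.len (g.headD "")) (pvP g)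
           ((pvP g).length
             + ((pvP g).foldl (pvInitStep g (g.length : Int) (PySem.Str.len (g.headD "")))
                 (PySem.Dict.empty, [], PySem.Set.empty)).2.1.length + 1)
           ((pvP g).foldl (pvInitStep g (g.length : Int) (PySem.Str.len (g.headD "")))
             (PySem.Dict.empty, [], PySem.Set.empty)).1
           ((pvP g).foldl (pvInitStep g (g.length : Int) (PySem.Str.len (g.headD "")))
             (PySem.Dict.empty, [], PySem.Set.empty)).2.1
           ((pvP g).foldl (pvInitStep g (g.length : Int) (PySem.Str.len (g.headD "")))
             (PySem.Dict.empty, [], PySem.Set.empty)).2.2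
           0) := by
    simp only [solve]
    rw [hrolls]
  have halt : solve_alt g
      = ((((pvP g).filter (fun cell => decide (pvLive (pvP g) cell < 4))).length : Int),
         pvRounds ((pvP g).length + 1) (pvP g) 0) := rfl
  obtain ⟨hq0, hd0, hnb0⟩ := initA_spec g (g.length : Int) (PySem.Str.len (g.headD ""))
    (pvP g) PySem.Dict.empty [] PySem.Set.empty hPnd
    (fun rc _ h => (List.not_mem_nil h).elim)
  rw [hq0, hd0] at hA
  simp only [PySem.Set.empty, List.nil_append] at hA
  have hq0sub : ∀ m ∈ (pvP g).filter
      (fun rc => decide (cntA g (g.length : Int) (PySem.Str.len (g.headD "")) rc < 4)),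
      m ∈ pvP g := fun m hm => (List.mem_filter.mp hm).1
  have hq0nd : ((pvP g).filter
      (fun rc => decide (cntA g (g.length : Int) (PySem.Str.len (g.headD "")) rc < 4))).Nodup :=
    hPnd.filter _
  have hq0lt : ∀ m ∈ (pvP g).filter
      (fun rc => decide (cntA g (g.length : Int) (PySem.Str.len (g.headD "")) rc < 4)),
      (pvDeg (pvP g) m : Int) < 4 := by
    intro m hm
    have h1 := (List.mem_filter.mp hm).2
    simp only [decide_eq_true_eq] at h1
    rw [cntA_eq g m (hq0sub m hm)] at h1
    exact h1
  have hq0SB : ∀ m ∈ (pvP g).filter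
      (fun rc => decide (cntA g (g.length : Int) (PySem.Str.len (g.headD "")) rc < 4)),
      m ∉ SB := by
    intro m hm hmsb
    have h1 := hq0lt m hm
    have h2 := hB4 m hmsb
    have h3 := pvDeg_le_of_subset SB (pvP g) m hB2 hPnd hB3
    omega
  have hcnt0 : ∀ m ∈ pvP g, m ∉ (pvP g).filter
      (fun rc => decide (cntA g (g.length : Int) (PySem.Str.len (g.headD "")) rc < 4)) →
      ((pvP g).foldl (pvInitStep g (g.length : Int) (PySem.Str.len (g.headD "")))
        (PySem.Dict.empty, [], PySem.Set.empty)).1.getD m 0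
        = (pvDeg (pvP g) m : Int)
          - (pvDeg (((pvP g).filter
              (fun rc => decide (cntA g (g.length : Int) (PySem.Str.len (g.headD "")) rc < 4))).filter
              (fun x => decide (x ∉ (pvP g).filter
                (fun rc => decide (cntA g (g.length : Int) (PySem.Str.len (g.headD "")) rc < 4))))) m : Int)
        ∧ 4 ≤ ((pvP g).foldl (pvInitStep g (g.length : Int) (PySem.Str.len (g.headD "")))
            (PySem.Dict.empty, [], PySem.Set.empty)).1.getD m 0 := by
    intro m hm hmq
    have hq0f : ((pvP g).filter
        (fun rc => decide (cntA g (g.length : Int) (PySem.Str.len (g.headD "")) rc < 4))).filter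
        (fun x => decide (x ∉ (pvP g).filter
          (fun rc => decide (cntA g (g.length : Int) (PySem.Str.len (g.headD "")) rc < 4)))) = [] :=
      List.filter_eq_nil_iff.mpr (fun a ha => by
        simp only [decide_eq_true_eq, not_not]
        exact ha)
    have hgec : ¬ (cntA g (g.length : Int) (PySem.Str.len (g.headD "")) m < 4) := by
      intro hlt
      exact hmq (List.mem_filter.mpr ⟨hm, by simpa using hlt⟩)
    have hv : ((pvP g).foldl (pvInitStep g (g.length : Int) (PySem.Str.len (g.headD "")))
        (PySem.Dict.empty, [], PySem.Set.empty)).1.getD m 0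
        = cntA g (g.length : Int) (PySem.Str.len (g.headD "")) m := by
      rw [hnb0 m, if_pos hm]
    constructor
    · rw [hv, cntA_eq g m hm, hq0f]
      simp [pvDeg]
    · rw [hv]
      have := cntA_eq g m hm
      omega
  obtain ⟨disc', hL1, hL2, hL3, hL4, hL5⟩ := pvLoopA_spec (g.length : Int)
    (PySem.Str.len (g.headD "")) (pvP g) SB hPnd hB2 hB3 hB4 hPN
    ((pvP g).length + ((pvP g).filter
      (fun rc => decide (cntA g (g.length : Int) (PySem.Str.len (g.headD "")) rc < 4))).length + 1)
    ((pvP g).foldl (pvInitStep g (g.length : Int) (PySem.Str.len (g.headD "")))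
      (PySem.Dict.empty, [], PySem.Set.empty)).1
    ((pvP g).filter
      (fun rc => decide (cntA g (g.length : Int) (PySem.Str.len (g.headD "")) rc < 4)))
    ((pvP g).filter
      (fun rc => decide (cntA g (g.length : Int) (PySem.Str.len (g.headD "")) rc < 4)))
    0
    hq0sub hq0nd (fun m hm => hm) hq0nd hq0SB hcnt0
    (by ring)
    (by
      have := List.length_filter_le (fun m => decide (m ∉ (pvP g).filter
        (fun rc => decide (cntA g (g.length : Int) (PySem.Str.len (g.headD "")) rc < 4)))) (pvP g)
      omega)
  simp only [PySem.Set.empty] at hL1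
  have hmemiff : ∀ x, x ∈ SB ↔ x ∈ (pvP g).filter (fun m => decide (m ∉ disc')) := by
    intro x
    constructor
    · intro hx
      rw [List.mem_filter]
      refine ⟨hB3 x hx, ?_⟩
      simp only [decide_eq_true_eq]
      intro hc
      exact hL4 x hc hx
    · intro hx
      refine hB5 ((pvP g).filter (fun m => decide (m ∉ disc'))) (hPnd.filter _)
        (fun m hm => (List.mem_filter.mp hm).1) ?_ x hx
      intro m hm
      have hmP := (List.mem_filter.mp hm).1
      have hmd : m ∉ disc' := by simpa using (List.mem_filter.mp hm).2
      have h4 := hL5 m hmP hmd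
      have he := pvDeg_filter_not (pvP g) disc' m hPnd hL2 hL3
      have hnat : (4 : Nat) ≤ pvDeg ((pvP g).filter (fun x => decide (x ∉ disc'))) m := by
        omega
      exact hnat
  have hlen_eq : SB.length = ((pvP g).filter (fun m => decide (m ∉ disc'))).length :=
    length_eq_of_mem_iff _ _ hB2 (hPnd.filter _) hmemiff
  have hcomp := length_filter_not_mem (pvP g) disc' hPnd hL2 hL3
  rw [hA, halt]
  have hr1 : (pvP g).filter
      (fun rc => decide (cntA g (g.length : Int) (PySem.Str.len (g.headD "")) rc < 4))
      = (pvP g).filter (fun cell => decide (pvLive (pvP g) cell < 4)) := by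
    apply List.filter_congr
    intro x hx
    rw [decide_eq_decide, cntA_eq g x hx, pvLive_eq (pvP g) x hPnd]
  simp only [Prod.mk.injEq]
  refine ⟨?_, ?_⟩
  · rw [hr1]
  · rw [hL1, hB1]
    omega
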